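-- pv_equiv track=rewrite | github.com/s-brk/LiBaC-V1 | Reduce.py | move_lines
-- ===== SOURCE A (Python) =====
-- def move_lines(lst):
--     """
--     Moves specified lines in a list to a new position based on a target line.
--
--     Removes predefined lines (`nx`, `ny`, `nz`) from their original positions and
--     inserts them after a specified target line (`property uchar blue`).
--
--     Parameters:
--     ----------
--     lst (list): The list of header lines to be modified.
--
--     Returns:
--     ----------
--     lst_copy (list): A new list with the lines moved to their target positions.
--     """
--
--     # Define the lines to move and their target position
--     lines_to_move = ['property double nx', 'property double ny', 'property double nz']
--     target_line = 'property uchar blue'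
--
--     # Create a copy of the original list
--     lst_copy = lst.copy()
--
--     # Remove the lines to be moved from their original positions in the copy
--     for line in lines_to_move:
--         if line in lst_copy:
--             lst_copy.remove(line)
--
--     # Find the index of the target line
--     if target_line in lst_copy:
--         target_index = lst_copy.index(target_line)
--
--         # Insert the lines to be moved after the target line
--         for line in reversed(lines_to_move):
--             lst_copy.insert(target_index + 1, line)
--
--     return lst_copy
-- ===== SOURCE B (Python) =====
-- def move_lines(lst):
--     lines_to_move = ['property double nx', 'property double ny', 'property double nz']
--     target_line = 'property uchar blue'
--     out = []
--     pending = list(lines_to_move)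
--     seen_target = False
--     for x in lst:
--         if x in pending:
--             pending.remove(x)
--             continue
--         out.append(x)
--         if not seen_target and x == target_line:
--             out.extend(lines_to_move)
--             seen_target = True
--     return out
-- ===== Notes on version B (the rewrite author's own statement) =====
-- stated objective: alternative
-- what changed: Single pass over lst with a pending-removals list and a seen-target flag, instead of copy + three membership/remove scans + index + three inserts.
import Mathlib
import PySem

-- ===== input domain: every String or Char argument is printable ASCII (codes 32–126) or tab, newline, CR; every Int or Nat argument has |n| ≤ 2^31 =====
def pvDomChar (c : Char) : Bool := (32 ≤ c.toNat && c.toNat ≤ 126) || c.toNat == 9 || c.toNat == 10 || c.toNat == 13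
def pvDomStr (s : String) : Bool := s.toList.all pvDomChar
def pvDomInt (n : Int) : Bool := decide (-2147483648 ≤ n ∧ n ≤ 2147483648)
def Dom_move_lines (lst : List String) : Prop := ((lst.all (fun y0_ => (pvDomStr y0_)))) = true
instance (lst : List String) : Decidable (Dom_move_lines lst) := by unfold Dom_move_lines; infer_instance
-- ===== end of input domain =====

-- B replaces A's copy + per-line remove + index + three inserts by one pass that skips
-- pending lines and splices the three moved lines right after the first target line (objective: alternative decomposition, same cost).

-- ===== PORT A =====
def move_lines (lst : List String) : List String :=
  let lines_to_move : List String :=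
    ["property double nx", "property double ny", "property double nz"]
  let target_line : String := "property uchar blue"
  -- for line in lines_to_move: if line in lst_copy: lst_copy.remove(line)
  let lst_copy := lines_to_move.foldl
    (fun lst_copy line =>
      if line ∈ lst_copy then (PySem.List.remove? lst_copy line).getD lst_copy else lst_copy)
    lst
  if target_line ∈ lst_copy then
    let target_index : Nat := (PySem.List.index? lst_copy target_line).getD 0
    -- for line in reversed(lines_to_move): lst_copy.insert(target_index + 1, line)
    lines_to_move.reverse.foldl
      (fun lst_copy line => PySem.List.insert lst_copy ((target_index : Int) + 1) line)
      lst_copy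
  else lst_copy

-- ===== PORT B =====
-- loop of Source B: state = (pending, seen_target); the built `out` is the returned list
def pvGoB (pending : List String) (seen_target : Bool) : List String → List String
  | [] => []
  | x :: xs =>
    if x ∈ pending then pvGoB (pending.erase x) seen_target xs
    else if !seen_target && (x == "property uchar blue") then
      x :: "property double nx" :: "property double ny" :: "property double nz" ::
        pvGoB pending true xs
    else x :: pvGoB pending seen_target xs

def move_lines_alt (lst : List String) : List String :=
  pvGoB ["property double nx", "property double ny", "property double nz"] false lst

-- ===== PRECONDITION & SPEC =====
def Spec_move_lines (lst : List String) (out : List String) : Prop := out = move_lines_alt lst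
instance (lst : List String) (out : List String) : Decidable (Spec_move_lines lst out) := by unfold Spec_move_lines; infer_instance

-- ===== CLAIM (what is proved, stated in full; the proofs are below) =====
def Claim_equal_move_lines : Prop := ∀ (lst : List String), Dom_move_lines lst → Spec_move_lines lst (move_lines lst)

-- ===== LEMMAS AND PROOFS =====

-- remove the first occurrence of p if present (A's loop body)
def pvRm1 (l : List String) (p : String) : List String := if p ∈ l then l.erase p else l

-- simultaneously skip the first occurrence of every pending line
def pvSkip : List String → List String → List String
  | _, [] => []
  | pending, x :: xs =>
    if x ∈ pending then pvSkip (pending.erase x) xs else x :: pvSkip pending xs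

-- splice the three moved lines after the first target line (no-op if absent)
def pvIns : List String → List String
  | [] => []
  | x :: xs =>
    if x = "property uchar blue" then
      x :: "property double nx" :: "property double ny" :: "property double nz" :: xs
    else x :: pvIns xs

theorem pvRm1_eq (acc : List String) (line : String) :
    (if line ∈ acc then (PySem.List.remove? acc line).getD acc else acc) = pvRm1 acc line := by
  unfold pvRm1
  split_ifs with h
  · rw [PySem.List.remove?_eq_some_erase acc line h]; rfl
  · rfl

theorem pvSkip_nil_pending (l : List String) : pvSkip [] l = l := by
  induction l with
  | nil => rfl
  | cons x xs ih => simp [pvSkip, ih]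

theorem pvSkip_rm1 (p : String) (l ps : List String) (hp : p ∉ ps) :
    pvSkip ps (pvRm1 l p) = pvSkip (p :: ps) l := by
  induction l generalizing ps with
  | nil => simp [pvRm1, pvSkip]
  | cons x xs ih =>
    by_cases hxp : x = p
    · subst hxp
      have h1 : pvRm1 (x :: xs) x = xs := by
        simp [pvRm1, List.erase_cons_head]
      have h2 : (x :: ps).erase x = ps := List.erase_cons_head x ps
      simp [h1, pvSkip, h2]
    · have hmem : p ∈ x :: xs ↔ p ∈ xs := by
        constructor
        · intro h; rcases List.mem_cons.mp h with h | h
          · exact absurd h.symm hxp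
          · exact h
        · exact fun h => List.mem_cons_of_mem _ h
      have hrm : pvRm1 (x :: xs) p = x :: pvRm1 xs p := by
        unfold pvRm1
        by_cases hpx : p ∈ xs
        · rw [if_pos (hmem.mpr hpx), if_pos hpx,
            List.erase_cons_tail (by simp; exact hxp)]
        · rw [if_neg (fun h => hpx (hmem.mp h)), if_neg hpx]
      rw [hrm]
      by_cases hxps : x ∈ ps
      · have hxcons : x ∈ p :: ps := List.mem_cons_of_mem _ hxps
        have herase : (p :: ps).erase x = p :: ps.erase x :=
          List.erase_cons_tail (by simpa using fun h => hxp h.symm)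
        have hp' : p ∉ ps.erase x := fun h => hp (List.mem_of_mem_erase h)
        simp only [pvSkip, if_pos hxps, if_pos hxcons, herase]
        exact ih (ps.erase x) hp'
      · have hxcons : x ∉ p :: ps := by
          intro h; rcases List.mem_cons.mp h with h | h
          · exact hxp h
          · exact hxps h
        simp only [pvSkip, if_neg hxps, if_neg hxcons]
        rw [ih ps hp]

theorem pvFold_rm1 (pending : List String) (hnd : pending.Nodup) (l : List String) :
    pending.foldl pvRm1 l = pvSkip pending l := by
  induction pending generalizing l with
  | nil => simp [List.foldl, pvSkip_nil_pending l]
  | cons p ps ih =>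
    have hp : p ∉ ps := (List.nodup_cons.mp hnd).1
    have hnd' : ps.Nodup := (List.nodup_cons.mp hnd).2
    calc (p :: ps).foldl pvRm1 l = ps.foldl pvRm1 (pvRm1 l p) := rfl
      _ = pvSkip ps (pvRm1 l p) := ih hnd' _
      _ = pvSkip (p :: ps) l := pvSkip_rm1 p l ps hp

theorem pvIns_of_not_mem (c : List String) (h : "property uchar blue" ∉ c) :
    pvIns c = c := by
  induction c with
  | nil => rfl
  | cons x xs ih =>
    have hx : x ≠ "property uchar blue" := fun hx => h (hx ▸ List.mem_cons_self)
    simp [pvIns, hx, ih (fun hm => h (List.mem_cons_of_mem _ hm))]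

theorem pvInsert_after (pre suf : List String) (t v : String) :
    PySem.List.insert (pre ++ t :: suf) ((pre.length : Int) + 1) v = pre ++ t :: v :: suf := by
  have hc : ((pre.length : Int) + 1) = (((pre.length + 1 : Nat)) : Int) := by push_cast; ring
  rw [hc, PySem.List.insert_natCast _ _ _ (by simp)]
  have h1 : (pre ++ t :: suf).take (pre.length + 1) = pre ++ [t] := by
    have : pre ++ t :: suf = (pre ++ [t]) ++ suf := by simp
    rw [this]
    simpa using List.take_left (l₁ := pre ++ [t]) (l₂ := suf)
  have h2 : (pre ++ t :: suf).drop (pre.length + 1) = suf := by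
    have : pre ++ t :: suf = (pre ++ [t]) ++ suf := by simp
    rw [this]
    simpa using List.drop_left (l₁ := pre ++ [t]) (l₂ := suf)
  rw [h1, h2]; simp

theorem pvIns_append (pre suf : List String) (h : "property uchar blue" ∉ pre) :
    pvIns (pre ++ "property uchar blue" :: suf) =
      pre ++ "property uchar blue" :: "property double nx" :: "property double ny" ::
        "property double nz" :: suf := by
  induction pre with
  | nil => simp [pvIns]
  | cons x xs ih =>
    have hx : x ≠ "property uchar blue" := fun hx => h (hx ▸ List.mem_cons_self)
    simp only [List.cons_append, pvIns, if_neg hx]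
    rw [ih (fun hm => h (List.mem_cons_of_mem _ hm))]

theorem pvGoB_true (l : List String) : ∀ pending, pvGoB pending true l = pvSkip pending l := by
  induction l with
  | nil => intro pending; rfl
  | cons x xs ih =>
    intro pending
    by_cases hx : x ∈ pending
    · simp [pvGoB, pvSkip, hx, ih]
    · simp [pvGoB, pvSkip, hx, ih]

theorem pvGoB_false (l : List String) :
    ∀ pending, "property uchar blue" ∉ pending →
      pvGoB pending false l = pvIns (pvSkip pending l) := by
  induction l with
  | nil => intro pending _; rfl
  | cons x xs ih =>
    intro pending hp
    by_cases hx : x ∈ pending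
    · have hp' : "property uchar blue" ∉ pending.erase x :=
        fun h => hp (List.mem_of_mem_erase h)
      simp only [pvGoB, if_pos hx, pvSkip]
      rw [ih (pending.erase x) hp']
    · by_cases ht : x = "property uchar blue"
      · subst ht
        simp only [pvGoB, if_neg hx, pvSkip]
        simp only [Bool.not_false, beq_self_eq_true, Bool.and_self, if_pos]
        rw [pvGoB_true xs pending]
        simp [pvIns]
      · simp only [pvGoB, if_neg hx, pvSkip]
        have : (!false && (x == "property uchar blue")) = false := by
          simp [ht]
        rw [this]
        simp only [Bool.false_eq_true, if_false]
        rw [ih pending hp]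
        simp [pvIns, ht]

theorem move_lines_eq (lst : List String) : move_lines lst = move_lines_alt lst := by
  unfold move_lines move_lines_alt
  have hfun : (fun (lst_copy : List String) (line : String) =>
      if line ∈ lst_copy then (PySem.List.remove? lst_copy line).getD lst_copy else lst_copy)
      = pvRm1 := by
    funext acc line; exact pvRm1_eq acc line
  simp only [hfun]
  have hnd : (["property double nx", "property double ny", "property double nz"] :
      List String).Nodup := by decide
  rw [pvFold_rm1 _ hnd lst]
  have hrhs : pvGoB ["property double nx", "property double ny", "property double nz"] false lst
      = pvIns (pvSkip ["property double nx", "property double ny", "property double nz"] lst) :=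
    pvGoB_false lst _ (by decide)
  rw [hrhs]
  set c := pvSkip ["property double nx", "property double ny", "property double nz"] lst with hc
  by_cases hmem : "property uchar blue" ∈ c
  · rw [if_pos hmem]
    obtain ⟨k, hk⟩ := Option.isSome_iff_exists.mp
      ((PySem.List.index?_isSome_iff c "property uchar blue").mpr hmem)
    obtain ⟨pre, suf, hsplit, hlen, hnot⟩ := (PySem.List.index?_eq_some_iff c "property uchar blue" k).mp hk
    rw [hk]
    simp only [Option.getD_some]
    subst hlen
    rw [hsplit]
    simp only [List.reverse_cons, List.reverse_nil, List.nil_append, List.cons_append,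
      List.foldl_cons, List.foldl_nil]
    rw [pvInsert_after, pvInsert_after, pvInsert_after]
    rw [pvIns_append pre suf hnot]
  · rw [if_neg hmem, pvIns_of_not_mem c hmem]

-- ===== VERDICT (by name: the statement is the Claim_ definition above) =====
theorem move_lines_spec : Claim_equal_move_lines := by
  intro lst _
  unfold Spec_move_lines
  exact move_lines_eq lst
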